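-- pv_equiv track=rewrite | github.com/uphria/utea | Week 4 PY/email.py | maskEmail
-- ===== SOURCE A (Python) =====
-- def getIndex(text, element):
--     if len(text) == 0:
--         return -1
--     index = 0
--     length = len(text)
--     while index < length:
--         if text[index] == element:
--             return index
--         index +=1
--     return -1
--
-- def validEmail(email):
--     indexAt = getIndex(email, "@")
--     if indexAt == -1:
--         return False
--     else:
--         indexDot = getIndex(email[indexAt:], ".")
--         return indexDot != -1 and email[-1] != "." and len(email[indexAt:]) > 3
--
-- def is_vowel(letter):
--     return letter == "a" or letter == "A" or \
--             letter == "e" or letter == "E" or \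
--             letter == "i" or letter == "I" or \
--             letter == "o" or letter == "O" or \
--             letter == "u" or letter == "U"
--
-- def maskEmail(email):
--     if not validEmail(email):
--         return "Invalid email format"
--     else:
--         maskedEmail = ""
--         index = 0
--         length = len(email)
--         firstHalf = len(email[:getIndex(email, "@")])
--         while index < length:
--             if index < firstHalf:
--                 if is_vowel(email[index]):
--                     maskedEmail += "*"
--                 else:
--                     maskedEmail += email[index]
--                 index += 1
--             else:
--                 if is_vowel(email[index]):
--                     maskedEmail += "#"
--                 else:
--                     maskedEmail += email[index]
--                 index += 1
--     return maskedEmail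
-- ===== SOURCE B (Python) =====
-- VOWELS = "aeiouAEIOU"
--
-- def maskEmail(email):
--     at = email.find('@')
--     if at == -1:
--         return "Invalid email format"
--     local, domain = email[:at], email[at:]
--     if '.' not in domain or email.endswith('.') or len(domain) <= 3:
--         return "Invalid email format"
--     local_table = str.maketrans(dict.fromkeys(VOWELS, '*'))
--     domain_table = str.maketrans(dict.fromkeys(VOWELS, '#'))
--     return local.translate(local_table) + domain.translate(domain_table)
-- ===== Notes on version B (the rewrite author's own statement) =====
-- stated objective: idiomatic
-- what changed: B replaces A's hand-rolled index search and single index-branching character loop by finding the at-sign once, slicing into local/domain parts, and masking vowels with two str.maketrans translation tables (one table-driven pass per part).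
import Mathlib
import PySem

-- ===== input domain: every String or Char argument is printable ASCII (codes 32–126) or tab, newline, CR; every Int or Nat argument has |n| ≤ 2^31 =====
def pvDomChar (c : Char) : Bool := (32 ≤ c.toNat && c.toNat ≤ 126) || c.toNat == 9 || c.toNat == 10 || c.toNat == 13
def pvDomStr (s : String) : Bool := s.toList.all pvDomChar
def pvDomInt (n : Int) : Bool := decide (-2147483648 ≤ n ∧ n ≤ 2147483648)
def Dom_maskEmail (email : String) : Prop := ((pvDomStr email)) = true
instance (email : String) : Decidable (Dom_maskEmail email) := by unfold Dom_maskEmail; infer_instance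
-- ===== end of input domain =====

-- B replaces A's index-branching character loop by a split at '@' and two table-driven
-- vowel-masking passes (str.translate); objective: idiomatic, same exact behaviour.

-- ===== PORT A =====
def getIndexAux (text : List Char) (element : Char) (index : Int) : Int :=
  match text with
  | [] => -1
  | c :: rest => if c = element then index else getIndexAux rest element (index + 1)

def getIndex (text : List Char) (element : Char) : Int :=
  if text.length = 0 then -1 else getIndexAux text element 0

def isVowel (letter : Char) : Bool :=
  letter = 'a' || letter = 'A' || letter = 'e' || letter = 'E' ||
  letter = 'i' || letter = 'I' || letter = 'o' || letter = 'O' ||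
  letter = 'u' || letter = 'U'

def validEmail (email : List Char) : Bool :=
  let indexAt := getIndex email '@'
  if indexAt = -1 then false
  else
    let indexDot := getIndex (PySem.List.slice email (some indexAt) none) '.'
    indexDot != -1 && (PySem.List.pyGet? email (-1) != some '.') &&
      decide ((PySem.List.slice email (some indexAt) none).length > 3)

def maskLoopA (email : List Char) (index firstHalf : Int) (masked : List Char) : List Char :=
  match email with
  | [] => masked
  | c :: rest =>
    if index < firstHalf then
      maskLoopA rest (index + 1) firstHalf (masked ++ [if isVowel c then '*' else c])
    else
      maskLoopA rest (index + 1) firstHalf (masked ++ [if isVowel c then '#' else c])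

def maskEmail (email : String) : String :=
  let cs := email.toList
  if !validEmail cs then "Invalid email format"
  else
    let firstHalf := (PySem.List.slice cs none (some (getIndex cs '@'))).length
    String.ofList (maskLoopA cs 0 (firstHalf : Int) [])

-- ===== PORT B =====
def pvVowels : List Char := "aeiouAEIOU".toList

def maskEmail_alt (email : String) : String :=
  let cs := email.toList
  let atIdx := PySem.Chars.find cs ['@']
  if atIdx = -1 then "Invalid email format"
  else
    let localPart := PySem.List.slice cs none (some atIdx)
    let domainPart := PySem.List.slice cs (some atIdx) none
    if !PySem.Chars.isIn ['.'] domainPart || PySem.Chars.endswith cs ['.'] ||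
        decide (domainPart.length ≤ 3) then
      "Invalid email format"
    else
      -- str.translate ported by its contract: per-character table lookup
      String.ofList (localPart.map (fun c => if c ∈ pvVowels then '*' else c) ++
                 domainPart.map (fun c => if c ∈ pvVowels then '#' else c))

-- ===== PRECONDITION & SPEC =====
def Spec_maskEmail (email : String) (out : String) : Prop := out = maskEmail_alt email
instance (email : String) (out : String) : Decidable (Spec_maskEmail email out) := by unfold Spec_maskEmail; infer_instance

-- ===== CLAIM (what is proved, stated in full; the proofs are below) =====
def Claim_equal_maskEmail : Prop := ∀ (email : String), Dom_maskEmail email → Spec_maskEmail email (maskEmail email)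

-- ===== LEMMAS AND PROOFS =====
lemma getIndexAux_eq_findGo (cs : List Char) (e : Char) (k : Nat) :
    getIndexAux cs e (k : Int) = PySem.Chars.find.go [e] cs k := by
  induction cs generalizing k with
  | nil => simp [getIndexAux, PySem.Chars.find.go]
  | cons c rest ih =>
    simp only [getIndexAux, PySem.Chars.find.go, List.isPrefixOf]
    by_cases h : c = e
    · simp [h]
    · have hec : (e == c) = false := by simp [Ne.symm h]
      rw [← ih (k + 1)]
      push_cast
      simp [h, hec]

lemma getIndex_eq_find (cs : List Char) (e : Char) :
    getIndex cs e = PySem.Chars.find cs [e] := by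
  cases cs with
  | nil => simp [getIndex, PySem.Chars.find, PySem.Chars.find.go]
  | cons c rest =>
    simp only [getIndex, List.length_cons, PySem.Chars.find]
    have := getIndexAux_eq_findGo (c :: rest) e 0
    simpa using this

lemma getIndexAux_bounds (cs : List Char) (e : Char) (k : Nat) :
    getIndexAux cs e (k : Int) = -1 ∨
      ((k : Int) ≤ getIndexAux cs e (k : Int) ∧ getIndexAux cs e (k : Int) < (k : Int) + cs.length) := by
  induction cs generalizing k with
  | nil => left; simp [getIndexAux]
  | cons c rest ih =>
    simp only [getIndexAux, List.length_cons]
    by_cases h : c = e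
    · right
      refine ⟨by simp [h], by simp [h]⟩
    · rcases ih (k + 1) with h1 | h1 <;> push_cast at h1 ⊢ <;> simp [h] <;> omega

lemma getIndex_bounds (cs : List Char) (e : Char) :
    getIndex cs e = -1 ∨ (0 ≤ getIndex cs e ∧ getIndex cs e < cs.length) := by
  cases cs with
  | nil => left; simp [getIndex]
  | cons c rest =>
    have := getIndexAux_bounds (c :: rest) e 0
    simp only [getIndex, List.length_cons] at *
    simpa using this

lemma pyGet?_neg_one_eq_getLast? (cs : List Char) :
    PySem.List.pyGet? cs (-1) = cs.getLast? := by
  simp [PySem.List.pyGet?, PySem.List.pyIdx?]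
  rcases cs.eq_nil_or_concat with h | ⟨ys, y, h⟩ <;> subst h <;> simp

lemma endswith_dot_iff (cs : List Char) :
    PySem.Chars.endswith cs ['.'] = true ↔ cs.getLast? = some '.' := by
  simp [PySem.Chars.endswith, List.isSuffixOf]
  cases h : cs.reverse with
  | nil => simp_all [List.reverse_eq_nil_iff]
  | cons a t =>
    have : cs.getLast? = some a := by
      rw [← List.head?_reverse]; simp [h]
    simp [this, List.cons_prefix_cons, eq_comm]

lemma vowel_eq (c : Char) (x : Char) :
    (if isVowel c then x else c) = (if c ∈ pvVowels then x else c) := by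
  have hv : isVowel c = true ↔ c ∈ pvVowels := by
    simp [isVowel, pvVowels]
    tauto
  by_cases h : isVowel c <;> by_cases h2 : c ∈ pvVowels <;> simp_all

lemma maskLoopA_eq (cs : List Char) (fh i : Nat) (acc : List Char) :
    maskLoopA cs (i : Int) (fh : Int) acc =
      acc ++ (cs.take (fh - i)).map (fun c => if isVowel c then '*' else c)
          ++ (cs.drop (fh - i)).map (fun c => if isVowel c then '#' else c) := by
  induction cs generalizing i acc with
  | nil => simp [maskLoopA]
  | cons c rest ih =>
    simp only [maskLoopA]
    by_cases h : i < fh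
    · have hlt : (i : Int) < fh := by exact_mod_cast h
      have hsub : fh - i = (fh - (i + 1)) + 1 := by omega
      rw [if_pos hlt, hsub]
      have := ih (i + 1) (acc ++ [if isVowel c then '*' else c])
      push_cast at this ⊢
      simp [this, List.take_succ_cons]
    · have hge : ¬ (i : Int) < fh := by exact_mod_cast h
      have hsub : fh - i = 0 := by omega
      have hsub1 : fh - (i + 1) = 0 := by omega
      rw [if_neg hge, hsub]
      have := ih (i + 1) (acc ++ [if isVowel c then '#' else c])
      rw [hsub1] at this
      push_cast at this ⊢
      simp [this]

-- ===== VERDICT (by name: the statement is the Claim_ definition above) =====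
theorem maskEmail_spec : Claim_equal_maskEmail := by
  intro email _
  unfold Spec_maskEmail maskEmail maskEmail_alt validEmail
  simp only [getIndex_eq_find]
  set cs := email.toList with hcs
  by_cases hat : PySem.Chars.find cs ['@'] = -1
  · simp [hat]
  · have hb := getIndex_bounds cs '@'
    rw [getIndex_eq_find] at hb
    rcases hb with h | ⟨h0, hlen⟩
    · exact absurd h hat
    set a := PySem.Chars.find cs ['@'] with ha
    have hdrop : PySem.List.slice cs (some a) none = cs.drop a.toNat :=
      PySem.List.slice_from cs h0
    have htake : PySem.List.slice cs none (some a) = cs.take a.toNat :=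
      PySem.List.slice_to cs h0
    have hlast : (PySem.List.pyGet? cs (-1) != some '.') = !PySem.Chars.endswith cs ['.'] := by
      rw [pyGet?_neg_one_eq_getLast?]
      by_cases he : PySem.Chars.endswith cs ['.'] = true
      · simp [he, (endswith_dot_iff cs).mp he]
      · have : cs.getLast? ≠ some '.' := fun hc => he ((endswith_dot_iff cs).mpr hc)
        simp [he, this]
    have hisin : (PySem.Chars.find (cs.drop a.toNat) ['.'] != -1)
        = PySem.Chars.isIn ['.'] (cs.drop a.toNat) := by
      simp [PySem.Chars.isIn]
    rw [if_neg hat, if_neg hat, hdrop, htake, hisin, hlast]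
    have hguard : (!(PySem.Chars.isIn ['.'] (cs.drop a.toNat) &&
          (!PySem.Chars.endswith cs ['.']) && decide ((cs.drop a.toNat).length > 3)))
        = (!PySem.Chars.isIn ['.'] (cs.drop a.toNat) || PySem.Chars.endswith cs ['.'] ||
          decide ((cs.drop a.toNat).length ≤ 3)) := by
      by_cases h1 : PySem.Chars.isIn ['.'] (cs.drop a.toNat) = true <;>
        by_cases h2 : PySem.Chars.endswith cs ['.'] = true <;>
        by_cases h3 : (cs.drop a.toNat).length > 3 <;>
        simp [h1, h2] <;>
        (try (by_cases h4 : cs.length ≤ 3 + a.toNat <;> simp [h4] <;> omega))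
    rw [hguard]
    by_cases hg : (!PySem.Chars.isIn ['.'] (cs.drop a.toNat) || PySem.Chars.endswith cs ['.'] ||
        decide ((cs.drop a.toNat).length ≤ 3)) = true
    · rw [if_pos hg, if_pos hg]
    · rw [if_neg hg, if_neg hg]
      have hanat : a.toNat < cs.length := by omega
      have hfh : (cs.take a.toNat).length = a.toNat := by
        simp [List.length_take]; omega
      rw [hfh]
      have := maskLoopA_eq cs a.toNat 0 []
      simp only [Nat.sub_zero, List.nil_append, Nat.cast_zero] at this
      rw [this]
      have hstar : (fun c => if isVowel c then '*' else c)
          = (fun c : Char => if c ∈ pvVowels then '*' else c) := funext (fun c => vowel_eq c '*')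
      have hhash : (fun c => if isVowel c then '#' else c)
          = (fun c : Char => if c ∈ pvVowels then '#' else c) := funext (fun c => vowel_eq c '#')
      rw [hstar, hhash]
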